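-- pv_equiv track=rewrite | github.com/DATAVIOMX/id_check | scripts/preprocess_text/text_filter.py | identify_cardtype
-- ===== SOURCE A (Python) =====
-- def identify_cardtype(text_vector):
--     ##### OJO HAY QUE TENER CUIDADO CON EL TEXTO ELECCIONES FEDERALES
--     if((any('TO FEDERAL' in mystring for mystring in text_vector)) and \
--         ((any('DMEX' in mystring for mystring in text_vector)) or \
--             (any('IDMEX' in mystring for mystring in text_vector)) or \
--                 (any('0MEX' in mystring for mystring in text_vector)))):
--         cred_type = 'd'
--     elif(any('TO NACIONAL' in mystring for mystring in text_vector) or any('TO NACION' in mystring for mystring in text_vector)):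
--         cred_type = 'e'
--     elif(any('TO FEDERAL' in mystring for mystring in text_vector) and \
--         ((any('DOCUMENTO' in mystring for mystring in text_vector)) or \
--             (any('TACHA' in mystring for mystring in text_vector)) or \
--             (any('ENMENDADURA' in mystring for mystring in text_vector)) or \
--                 (any('INTRANSFERIBLE' in mystring for mystring in text_vector)) \
--         )):
--         cred_type = 'a'
--     else:
--         cred_type = 'NOT DETECTED'
--     return(cred_type)
-- ===== SOURCE B (Python) =====
-- PATTERNS = ['TO FEDERAL', 'DMEX', 'IDMEX', '0MEX', 'TO NACIONAL',
--             'TO NACION', 'DOCUMENTO', 'TACHA', 'ENMENDADURA', 'INTRANSFERIBLE']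
--
-- def identify_cardtype(text_vector):
--     # One pass over the vector: index which target substrings occur anywhere,
--     # then decide the card type by pure boolean logic on that set.
--     present = set()
--     for mystring in text_vector:
--         for p in PATTERNS:
--             if p in mystring:
--                 present.add(p)
--     if 'TO FEDERAL' in present and ('DMEX' in present or 'IDMEX' in present or '0MEX' in present):
--         return 'd'
--     if 'TO NACIONAL' in present or 'TO NACION' in present:
--         return 'e'
--     if 'TO FEDERAL' in present and ('DOCUMENTO' in present or 'TACHA' in present
--                                     or 'ENMENDADURA' in present or 'INTRANSFERIBLE' in present):
--         return 'a'
--     return 'NOT DETECTED'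
-- ===== Notes on version B (the rewrite author's own statement) =====
-- stated objective: idiomatic
-- what changed: B makes a single pass over text_vector building the set of target substrings that occur anywhere, then decides the card type by boolean membership tests on that set, instead of A's up-to-ten separate any(...) scans of the whole vector.
import Mathlib
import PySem

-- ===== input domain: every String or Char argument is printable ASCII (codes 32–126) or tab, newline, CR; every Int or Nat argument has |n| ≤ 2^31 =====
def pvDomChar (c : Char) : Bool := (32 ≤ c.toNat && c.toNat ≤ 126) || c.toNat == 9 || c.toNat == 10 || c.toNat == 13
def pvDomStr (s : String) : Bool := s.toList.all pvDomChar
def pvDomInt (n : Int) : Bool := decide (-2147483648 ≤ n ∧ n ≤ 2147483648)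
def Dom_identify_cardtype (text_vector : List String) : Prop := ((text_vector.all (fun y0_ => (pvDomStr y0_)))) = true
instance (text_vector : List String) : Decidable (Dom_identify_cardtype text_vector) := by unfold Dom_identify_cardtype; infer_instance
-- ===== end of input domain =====

-- B replaces A's repeated any(...) scans of the vector by one indexing pass building the
-- set of present target substrings, then pure boolean membership logic (objective: idiomatic).

-- ===== PORT A =====
def identify_cardtype (text_vector : List String) : String :=
  if (text_vector.any (fun mystring => PySem.Str.isIn "TO FEDERAL" mystring)) &&
       ((text_vector.any (fun mystring => PySem.Str.isIn "DMEX" mystring)) ||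
        (text_vector.any (fun mystring => PySem.Str.isIn "IDMEX" mystring)) ||
        (text_vector.any (fun mystring => PySem.Str.isIn "0MEX" mystring))) then
    "d"
  else if (text_vector.any (fun mystring => PySem.Str.isIn "TO NACIONAL" mystring)) ||
          (text_vector.any (fun mystring => PySem.Str.isIn "TO NACION" mystring)) then
    "e"
  else if (text_vector.any (fun mystring => PySem.Str.isIn "TO FEDERAL" mystring)) &&
          ((text_vector.any (fun mystring => PySem.Str.isIn "DOCUMENTO" mystring)) ||
           (text_vector.any (fun mystring => PySem.Str.isIn "TACHA" mystring)) ||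
           (text_vector.any (fun mystring => PySem.Str.isIn "ENMENDADURA" mystring)) ||
           (text_vector.any (fun mystring => PySem.Str.isIn "INTRANSFERIBLE" mystring))) then
    "a"
  else
    "NOT DETECTED"

-- ===== PORT B =====
def pvPatterns : List String :=
  ["TO FEDERAL", "DMEX", "IDMEX", "0MEX", "TO NACIONAL",
   "TO NACION", "DOCUMENTO", "TACHA", "ENMENDADURA", "INTRANSFERIBLE"]

def pvPresent (text_vector : List String) : PySem.Set String :=
  text_vector.foldl
    (fun acc mystring =>
      pvPatterns.foldl
        (fun acc2 p => if PySem.Str.isIn p mystring then PySem.Set.add acc2 p else acc2)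
        acc)
    PySem.Set.empty

def identify_cardtype_alt (text_vector : List String) : String :=
  let present := pvPresent text_vector
  if present.contains "TO FEDERAL" &&
       (present.contains "DMEX" || present.contains "IDMEX" || present.contains "0MEX") then
    "d"
  else if present.contains "TO NACIONAL" || present.contains "TO NACION" then
    "e"
  else if present.contains "TO FEDERAL" &&
          (present.contains "DOCUMENTO" || present.contains "TACHA" ||
           present.contains "ENMENDADURA" || present.contains "INTRANSFERIBLE") then
    "a"
  else
    "NOT DETECTED"

-- ===== PRECONDITION & SPEC =====
def Spec_identify_cardtype (text_vector : List String) (out : String) : Prop := out = identify_cardtype_alt text_vector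
instance (text_vector : List String) (out : String) : Decidable (Spec_identify_cardtype text_vector out) := by unfold Spec_identify_cardtype; infer_instance

-- ===== CLAIM (what is proved, stated in full; the proofs are below) =====
def Claim_equal_identify_cardtype : Prop := ∀ (text_vector : List String), Dom_identify_cardtype text_vector → Spec_identify_cardtype text_vector (identify_cardtype text_vector)

-- ===== LEMMAS AND PROOFS =====

-- membership in the inner fold over an arbitrary pattern list
theorem pv_mem_inner (ps : List String) (acc : PySem.Set String) (s q : String) :
    q ∈ ps.foldl (fun acc2 p => if PySem.Str.isIn p s then PySem.Set.add acc2 p else acc2) acc ↔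
      q ∈ acc ∨ (q ∈ ps ∧ PySem.Str.isIn q s = true) := by
  induction ps generalizing acc with
  | nil => simp
  | cons p ps ih =>
    simp only [List.foldl_cons, ih]
    by_cases h : PySem.Str.isIn p s = true
    · rw [if_pos h]
      simp only [PySem.Set.mem_add, List.mem_cons]
      constructor
      · rintro ((hq | rfl) | ⟨hps, hin⟩)
        · exact Or.inl hq
        · exact Or.inr ⟨Or.inl rfl, h⟩
        · exact Or.inr ⟨Or.inr hps, hin⟩
      · rintro (hq | ⟨(rfl | hps), hin⟩)
        · exact Or.inl (Or.inl hq)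
        · exact Or.inl (Or.inr rfl)
        · exact Or.inr ⟨hps, hin⟩
    · simp only [if_neg h, List.mem_cons]
      constructor
      · rintro (hq | ⟨hps, hin⟩)
        · exact Or.inl hq
        · exact Or.inr ⟨Or.inr hps, hin⟩
      · rintro (hq | ⟨(rfl | hps), hin⟩)
        · exact Or.inl hq
        · exact absurd hin h
        · exact Or.inr ⟨hps, hin⟩

theorem pv_mem_fold (tv : List String) (acc : PySem.Set String) (q : String) :
    q ∈ tv.foldl
        (fun a s => pvPatterns.foldl
          (fun acc2 p => if PySem.Str.isIn p s then PySem.Set.add acc2 p else acc2) a)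
        acc ↔
      q ∈ acc ∨ (q ∈ pvPatterns ∧ ∃ s ∈ tv, PySem.Str.isIn q s = true) := by
  induction tv generalizing acc with
  | nil => simp
  | cons s tv ih =>
    simp only [List.foldl_cons, ih, pv_mem_inner, List.mem_cons]
    constructor
    · rintro ((hq | ⟨hp, hin⟩) | ⟨hp, t, ht, hin⟩)
      · exact Or.inl hq
      · exact Or.inr ⟨hp, s, Or.inl rfl, hin⟩
      · exact Or.inr ⟨hp, t, Or.inr ht, hin⟩
    · rintro (hq | ⟨hp, t, (rfl | ht), hin⟩)
      · exact Or.inl (Or.inl hq)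
      · exact Or.inl (Or.inr ⟨hp, hin⟩)
      · exact Or.inr ⟨hp, t, ht, hin⟩

theorem pv_contains_present (tv : List String) (q : String) (hq : q ∈ pvPatterns) :
    (pvPresent tv).contains q = tv.any (fun s => PySem.Str.isIn q s) := by
  rw [Bool.eq_iff_iff, PySem.Set.contains_iff, List.any_eq_true]
  unfold pvPresent
  rw [pv_mem_fold]
  simp only [PySem.Set.empty, List.not_mem_nil, false_or]
  exact ⟨fun ⟨_, h⟩ => h, fun h => ⟨hq, h⟩⟩

-- ===== VERDICT (by name: the statement is the Claim_ definition above) =====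
theorem identify_cardtype_spec : Claim_equal_identify_cardtype := by
  intro tv _
  show identify_cardtype tv = identify_cardtype_alt tv
  unfold identify_cardtype identify_cardtype_alt
  simp only [pv_contains_present tv "TO FEDERAL" (by decide),
      pv_contains_present tv "DMEX" (by decide),
      pv_contains_present tv "IDMEX" (by decide),
      pv_contains_present tv "0MEX" (by decide),
      pv_contains_present tv "TO NACIONAL" (by decide),
      pv_contains_present tv "TO NACION" (by decide),
      pv_contains_present tv "DOCUMENTO" (by decide),
      pv_contains_present tv "TACHA" (by decide),
      pv_contains_present tv "ENMENDADURA" (by decide),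
      pv_contains_present tv "INTRANSFERIBLE" (by decide)]
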